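-- pv_equiv track=rewrite | github.com/renzhiyang/error-aware-calling | src/generate_tensor.py | get_query_base
-- ===== SOURCE A (Python) =====
-- def get_query_base(query_seq, cigar, ref_start, candidate_pos):
--     cur_base = ""
--     next_ins = "N"
--     length = 0
--     query_index = 0
--     ref_index = ref_start
--
--     for b in cigar:
--         if b.isdigit():
--             length = length * 10 + int(b)
--             continue
--
--         if b == "S":
--             query_index += length
--
--         elif b in "MX=":
--             for _ in range(length):
--                 if ref_index <= candidate_pos:
--                     cur_base = query_seq[query_index]
--                 query_index += 1
--                 ref_index += 1
--         elif b == "I":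
--             if ref_index == candidate_pos + 1:
--                 next_ins = query_seq[query_index : query_index + length]
--             query_index += length
--         elif b == "D":
--             for _ in range(length):
--                 if ref_index <= candidate_pos:
--                     cur_base = "-"
--                 ref_index += 1
--         length = 0
--
--     if cur_base == "N":  # for some case there are N showed in query reads
--         cur_base = "-"
--     return cur_base, next_ins
-- ===== SOURCE B (Python) =====
-- def get_query_base(query_seq, cigar, ref_start, candidate_pos):
--     # Tokenize the CIGAR once, then handle each op with direct index
--     # arithmetic instead of a per-base inner loop.
--     ops = []
--     n = 0
--     for ch in cigar:
--         if ch.isdigit():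
--             n = n * 10 + int(ch)
--         else:
--             ops.append((n, ch))
--             n = 0
--
--     cur_base = ""
--     next_ins = "N"
--     q = 0
--     r = ref_start
--     for length, op in ops:
--         if op == "S":
--             q += length
--         elif op in "MX=":
--             if length > 0 and r <= candidate_pos:
--                 cur_base = query_seq[q + min(length - 1, candidate_pos - r)]
--             q += length
--             r += length
--         elif op == "I":
--             if r == candidate_pos + 1:
--                 next_ins = query_seq[q : q + length]
--             q += length
--         elif op == "D":
--             if length > 0 and r <= candidate_pos:
--                 cur_base = "-"
--             r += length
--
--     if cur_base == "N":
--         cur_base = "-"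
--     return cur_base, next_ins
-- ===== Notes on version B (the rewrite author's own statement) =====
-- stated objective: alternative
-- what changed: B tokenizes the CIGAR once into (length, op) pairs and then handles each op with direct index arithmetic (index q + min(length-1, candidate_pos-r) for M/X/=, a single test for D), replacing A's per-reference-base inner loops.
-- outside the precondition, e.g. on get_query_base('A', '1M1M', 0, 0): A returns ('A', 'N'), B returns ('A', 'N')
import Mathlib
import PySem

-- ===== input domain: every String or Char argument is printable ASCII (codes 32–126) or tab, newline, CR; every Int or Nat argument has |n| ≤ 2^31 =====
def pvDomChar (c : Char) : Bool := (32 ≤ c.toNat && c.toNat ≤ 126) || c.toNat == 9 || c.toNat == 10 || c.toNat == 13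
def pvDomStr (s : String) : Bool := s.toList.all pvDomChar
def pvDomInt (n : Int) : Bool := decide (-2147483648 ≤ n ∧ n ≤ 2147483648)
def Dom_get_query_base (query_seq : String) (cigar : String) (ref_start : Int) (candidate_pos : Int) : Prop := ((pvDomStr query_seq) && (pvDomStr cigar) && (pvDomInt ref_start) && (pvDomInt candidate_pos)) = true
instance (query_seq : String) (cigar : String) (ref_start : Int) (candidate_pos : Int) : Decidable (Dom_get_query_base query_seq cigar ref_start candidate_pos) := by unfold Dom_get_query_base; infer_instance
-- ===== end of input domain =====

-- B tokenizes the CIGAR once into (length, op) pairs and handles each op with direct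
-- index arithmetic instead of A's per-reference-base inner loops; same return value
-- wherever A returns.
-- Where Python A raises IndexError (query index past the read, excluded by Pre_) both ports
-- return the default ("", "N"); nothing is claimed there.

-- ===== PORT A =====
-- A's state while scanning the CIGAR character by character:
-- (cur_base, next_ins, length, query_index, ref_index); `none` = IndexError was raised.
-- inner body of `for _ in range(length)` of the M/X/= branch (the loop variable is unused)
def pvAM (qs : List Char) (cand : Int) (st : Option (String × Int × Int)) : Option (String × Int × Int) :=
  match st with
  | none => none
  | some (cur, q, r) =>
    if r ≤ cand then
      match PySem.List.pyGet? qs q with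
      | none => none                                   -- query_seq[query_index] raised IndexError
      | some c => some (String.singleton c, q + 1, r + 1)
    else some (cur, q + 1, r + 1)

-- inner body of `for _ in range(length)` of the D branch
def pvAD (cand : Int) (st : String × Int) : String × Int :=
  (if st.2 ≤ cand then "-" else st.1, st.2 + 1)

-- one character b of the CIGAR
def pvAStep (qs : List Char) (cand : Int) (st : Option (String × String × Int × Int × Int)) (b : Char) :
    Option (String × String × Int × Int × Int) :=
  match st with
  | none => none
  | some (cur, ins, len, q, r) =>
    if PySem.Chars.isdigit b then
      some (cur, ins, len * 10 + ((b.toNat : Int) - 48), q, r)   -- int(b); exact for an ASCII digit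
    else if b = 'S' then some (cur, ins, 0, q + len, r)
    else if b = 'M' ∨ b = 'X' ∨ b = '=' then
      match (PySem.List.pyRange 0 len 1).foldl (fun st _ => pvAM qs cand st) (some (cur, q, r)) with
      | none => none
      | some (cur', q', r') => some (cur', ins, 0, q', r')
    else if b = 'I' then
      some (cur,
        (if r = cand + 1 then String.ofList (PySem.List.slice qs (some q) (some (q + len))) else ins),
        0, q + len, r)
    else if b = 'D' then
      match (PySem.List.pyRange 0 len 1).foldl (fun st _ => pvAD cand st) (cur, r) with
      | (cur', r') => some (cur', ins, 0, q, r')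
    else some (cur, ins, 0, q, r)

def get_query_base (query_seq : String) (cigar : String) (ref_start : Int) (candidate_pos : Int) : String × String :=
  match cigar.toList.foldl (pvAStep query_seq.toList candidate_pos) (some ("", "N", 0, 0, ref_start)) with
  | none => ("", "N")          -- Python raises IndexError here; such inputs are outside Pre_
  | some (cur, ins, _, _, _) => (if cur = "N" then "-" else cur, ins)

-- ===== PORT B =====
-- tokenize the CIGAR into (length, op) pairs (trailing digits are discarded, as in Source B)
def pvBTok : List Char → Int → List (Int × Char)
  | [], _ => []
  | c :: cs, n =>
    if PySem.Chars.isdigit c then pvBTok cs (n * 10 + ((c.toNat : Int) - 48))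
    else (n, c) :: pvBTok cs 0

-- one (length, op) token; state (cur_base, next_ins, q, r); `none` = IndexError
def pvBStep (qs : List Char) (cand : Int) (st : Option (String × String × Int × Int)) (t : Int × Char) :
    Option (String × String × Int × Int) :=
  match st with
  | none => none
  | some (cur, ins, q, r) =>
    let len := t.1
    let op := t.2
    if op = 'S' then some (cur, ins, q + len, r)
    else if op = 'M' ∨ op = 'X' ∨ op = '=' then
      if 0 < len ∧ r ≤ cand then
        match PySem.List.pyGet? qs (q + min (len - 1) (cand - r)) with
        | none => none
        | some c => some (String.singleton c, ins, q + len, r + len)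
      else some (cur, ins, q + len, r + len)
    else if op = 'I' then
      some (cur,
        (if r = cand + 1 then String.ofList (PySem.List.slice qs (some q) (some (q + len))) else ins),
        q + len, r)
    else if op = 'D' then
      some ((if 0 < len ∧ r ≤ cand then "-" else cur), ins, q, r + len)
    else some (cur, ins, q, r)

def get_query_base_alt (query_seq : String) (cigar : String) (ref_start : Int) (candidate_pos : Int) : String × String :=
  match (pvBTok cigar.toList 0).foldl (pvBStep query_seq.toList candidate_pos) (some ("", "N", 0, ref_start)) with
  | none => ("", "N")          -- Python raises IndexError here; such inputs are outside Pre_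
  | some (cur, ins, _, _) => (if cur = "N" then "-" else cur, ins)

-- ===== PRECONDITION & SPEC =====
-- total number of query bases the CIGAR consumes (sum of the lengths of the S/M/X/=/I ops):
-- the digit runs of the CIGAR, paired with the op character that follows each
def pvQueryConsumed (cigar : String) : Int :=
  (((cigar.toList.splitOnP fun c => !(PySem.Chars.isdigit c)).zip
      (cigar.toList.filter fun c => !(PySem.Chars.isdigit c))).map
    (fun p => if p.2 = 'S' ∨ p.2 = 'M' ∨ p.2 = 'X' ∨ p.2 = '=' ∨ p.2 = 'I'
              then (PySem.Int.ofChars? p.1).getD 0 else 0)).sum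

-- Pre_ excludes inputs on which Python A raises IndexError (query index beyond the read); the
-- sufficient closed-form condition used is the SAM validity invariant "the CIGAR consumes at most
-- len(query_seq) query bases", or "candidate_pos lies before ref_start" (then no base is read).
-- It is sufficient, not exact, so it also excludes some inputs on which A returns (see the cite).
def Pre_get_query_base (query_seq : String) (cigar : String) (ref_start : Int) (candidate_pos : Int) : Prop :=
  candidate_pos < ref_start ∨ pvQueryConsumed cigar ≤ (query_seq.toList.length : Int)

instance (query_seq : String) (cigar : String) (ref_start : Int) (candidate_pos : Int) : Decidable (Pre_get_query_base query_seq cigar ref_start candidate_pos) := by unfold Pre_get_query_base; infer_instance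

def pvWitness_get_query_base : String × String × Int × Int := ("ACGT", "2S2M", 0, 1)

def Spec_get_query_base (query_seq : String) (cigar : String) (ref_start : Int) (candidate_pos : Int) (out : String × String) : Prop := out = get_query_base_alt query_seq cigar ref_start candidate_pos
instance (query_seq : String) (cigar : String) (ref_start : Int) (candidate_pos : Int) (out : String × String) : Decidable (Spec_get_query_base query_seq cigar ref_start candidate_pos out) := by unfold Spec_get_query_base; infer_instance

-- ===== CLAIM (what is proved, stated in full; the proofs are below) =====
def Claim_equal_get_query_base : Prop := ∀ (query_seq : String) (cigar : String) (ref_start : Int) (candidate_pos : Int), Dom_get_query_base query_seq cigar ref_start candidate_pos → Pre_get_query_base query_seq cigar ref_start candidate_pos → Spec_get_query_base query_seq cigar ref_start candidate_pos (get_query_base query_seq cigar ref_start candidate_pos)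

-- ===== LEMMAS AND PROOFS =====
-- (the two ports agree even on the error states, so Pre_ is not needed by the proof;
-- Pre_'s role is to exclude the inputs where the PYTHON raises while the ports return the default)

-- a fold whose body ignores the list element is an iterate of its body
lemma pv_foldl_ignore {α β : Type} (g : α → α) :
    ∀ (l : List β) (init : α), l.foldl (fun s _ => g s) init = g^[l.length] init := by
  intro l
  induction l with
  | nil => intro init; rfl
  | cons x xs ih =>
    intro init
    simp [List.foldl_cons, ih, Function.iterate_succ_apply]

lemma pv_pyGet?_none_mono {qs : List Char} {i j : Int} (h0 : 0 ≤ i) (hij : i ≤ j)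
    (h : PySem.List.pyGet? qs i = none) : PySem.List.pyGet? qs j = none := by
  rw [PySem.List.pyGet?_of_nonneg qs h0] at h
  rw [PySem.List.pyGet?_of_nonneg qs (le_trans h0 hij)]
  rw [List.getElem?_eq_none_iff] at h ⊢
  omega

-- closed form of A's M/X/= inner loop
lemma pv_mIter (qs : List Char) (cand : Int) :
    ∀ (n : Nat) (cur : String) (q r : Int), 0 ≤ q →
      (pvAM qs cand)^[n] (some (cur, q, r)) =
        if 0 < (n : Int) ∧ r ≤ cand then
          match PySem.List.pyGet? qs (q + min ((n : Int) - 1) (cand - r)) with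
          | none => none
          | some c => some (String.singleton c, q + n, r + n)
        else some (cur, q + n, r + n) := by
  intro n
  induction n with
  | zero => intro cur q r _; simp
  | succ n ih =>
    intro cur q r hq
    rw [Function.iterate_succ_apply]
    by_cases hr : r ≤ cand
    · have hstep : pvAM qs cand (some (cur, q, r)) =
          match PySem.List.pyGet? qs q with
          | none => none
          | some c => some (String.singleton c, q + 1, r + 1) := by
        simp [pvAM, hr]
      rw [hstep]
      cases hget : PySem.List.pyGet? qs q with
      | none =>
        have : PySem.List.pyGet? qs (q + min ((↑n + 1:Int) - 1) (cand - r)) = none := by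
          apply pv_pyGet?_none_mono hq (by omega) hget
        simp only [Function.iterate_fixed (by rfl : pvAM qs cand none = none)]
        rw [if_pos ⟨by push_cast; omega, hr⟩]
        push_cast at this ⊢
        rw [this]
      | some c =>
        rw [ih (String.singleton c) (q + 1) (r + 1) (by omega)]
        by_cases hrest : 0 < (n : Int) ∧ r + 1 ≤ cand
        · rw [if_pos hrest, if_pos ⟨by push_cast; omega, hr⟩]
          have : q + 1 + min ((n:Int) - 1) (cand - (r + 1)) = q + min ((↑n + 1:Int) - 1) (cand - r) := by
            omega
          push_cast at this ⊢
          rw [this]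
          cases PySem.List.pyGet? qs (q + min ((n:Int) + 1 - 1) (cand - r)) with
          | none => rfl
          | some c' =>
            simp only [Option.some.injEq, Prod.mk.injEq]
            refine ⟨trivial, by ring, by ring⟩
        · rw [if_neg hrest, if_pos ⟨by push_cast; omega, hr⟩]
          have hmin0 : min ((↑n + 1:Int) - 1) (cand - r) = 0 := by omega
          push_cast at hmin0 ⊢
          rw [hmin0, add_zero, hget]
          simp only [Option.some.injEq, Prod.mk.injEq]
          refine ⟨trivial, by ring, by ring⟩
    · have hstep : pvAM qs cand (some (cur, q, r)) = some (cur, q + 1, r + 1) := by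
        simp [pvAM, hr]
      rw [hstep, ih cur (q + 1) (r + 1) (by omega)]
      rw [if_neg (by omega), if_neg (by push_cast; omega)]
      simp only [Option.some.injEq, Prod.mk.injEq]
      refine ⟨trivial, by push_cast; ring, by push_cast; ring⟩

-- closed form of A's D inner loop
lemma pv_dIter (cand : Int) :
    ∀ (n : Nat) (cur : String) (r : Int),
      (pvAD cand)^[n] (cur, r) =
        ((if 0 < (n : Int) ∧ r ≤ cand then "-" else cur), r + n) := by
  intro n
  induction n with
  | zero => intro cur r; simp
  | succ n ih =>
    intro cur r
    rw [Function.iterate_succ_apply]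
    by_cases hr : r ≤ cand
    · have hstep : pvAD cand (cur, r) = ("-", r + 1) := by simp [pvAD, hr]
      rw [hstep, ih, ite_self, if_pos ⟨by push_cast; omega, hr⟩]
      simp only [Prod.mk.injEq]
      exact ⟨trivial, by push_cast; ring⟩
    · have hstep : pvAD cand (cur, r) = (cur, r + 1) := by simp [pvAD, hr]
      rw [hstep, ih]
      rw [if_neg (by omega), if_neg (by push_cast; omega)]
      simp only [Prod.mk.injEq]
      exact ⟨trivial, by push_cast; ring⟩

lemma pv_a_none (qs : List Char) (cand : Int) :
    ∀ (cs : List Char), cs.foldl (pvAStep qs cand) none = none := by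
  intro cs
  induction cs with
  | nil => rfl
  | cons c cs ih => simpa [List.foldl_cons, pvAStep] using ih

lemma pv_b_none (qs : List Char) (cand : Int) :
    ∀ (ts : List (Int × Char)), ts.foldl (pvBStep qs cand) none = none := by
  intro ts
  induction ts with
  | nil => rfl
  | cons t ts ih => simpa [List.foldl_cons, pvBStep] using ih

lemma pv_isdigit_ge (c : Char) (h : PySem.Chars.isdigit c = true) : 48 ≤ (c.toNat : Int) := by
  simp only [PySem.Chars.isdigit, Bool.and_eq_true, decide_eq_true_eq] at h
  have h1 : ('0' : Char) ≤ c := h.1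
  rw [Char.le_def] at h1
  have h2 : ('0' : Char).toNat ≤ c.toNat := h1
  have h48 : ('0' : Char).toNat = 48 := rfl
  omega

-- fusion: A's character-by-character scan equals B's tokenize-then-process scan
-- (projection drops A's pending `length`, which trailing digits may leave non-zero)
lemma pv_fuse (qs : List Char) (cand : Int) :
    ∀ (cs : List Char) (cur ins : String) (len q r : Int), 0 ≤ len → 0 ≤ q →
      (cs.foldl (pvAStep qs cand) (some (cur, ins, len, q, r))).map
          (fun st => (st.1, st.2.1, st.2.2.2.1, st.2.2.2.2)) =
        (pvBTok cs len).foldl (pvBStep qs cand) (some (cur, ins, q, r)) := by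
  intro cs
  induction cs with
  | nil => intro cur ins len q r _ _; rfl
  | cons c cs ih =>
    intro cur ins len q r hlen hq
    by_cases hd : PySem.Chars.isdigit c
    · have hA : pvAStep qs cand (some (cur, ins, len, q, r)) c =
          some (cur, ins, len * 10 + ((c.toNat : Int) - 48), q, r) := by
        simp [pvAStep, hd]
      have hT : pvBTok (c :: cs) len = pvBTok cs (len * 10 + ((c.toNat : Int) - 48)) := by
        simp [pvBTok, hd]
      rw [List.foldl_cons, hA, hT]
      exact ih cur ins _ q r (by have := pv_isdigit_ge c hd; omega) hq
    · have hT : pvBTok (c :: cs) len = (len, c) :: pvBTok cs 0 := by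
        simp [pvBTok, hd]
      rw [List.foldl_cons, hT, List.foldl_cons]
      have hcast : ((len.toNat : Int)) = len := Int.toNat_of_nonneg hlen
      by_cases hS : c = 'S'
      · subst hS
        have hA : pvAStep qs cand (some (cur, ins, len, q, r)) 'S' =
            some (cur, ins, 0, q + len, r) := by simp [pvAStep, hd]
        have hB : pvBStep qs cand (some (cur, ins, q, r)) (len, 'S') =
            some (cur, ins, q + len, r) := by simp [pvBStep]
        rw [hA, hB]
        exact ih cur ins 0 (q + len) r le_rfl (by omega)
      · by_cases hM : c = 'M' ∨ c = 'X' ∨ c = '='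
        · have e : (PySem.List.pyRange 0 len 1).foldl (fun st _ => pvAM qs cand st)
              (some (cur, q, r)) = (pvAM qs cand)^[len.toNat] (some (cur, q, r)) := by
            rw [pv_foldl_ignore, PySem.List.length_pyRange_one, sub_zero]
          have hA : pvAStep qs cand (some (cur, ins, len, q, r)) c =
              match (pvAM qs cand)^[len.toNat] (some (cur, q, r)) with
              | none => none
              | some (cur', q', r') => some (cur', ins, 0, q', r') := by
            simp [pvAStep, hd, hS, hM, e]
          rw [hA, pv_mIter qs cand len.toNat cur q r hq, hcast]
          have hB : pvBStep qs cand (some (cur, ins, q, r)) (len, c) =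
              if 0 < len ∧ r ≤ cand then
                match PySem.List.pyGet? qs (q + min (len - 1) (cand - r)) with
                | none => none
                | some ch => some (String.singleton ch, ins, q + len, r + len)
              else some (cur, ins, q + len, r + len) := by
            simp [pvBStep, hS, hM]
          rw [hB]
          by_cases hc : 0 < len ∧ r ≤ cand
          · rw [if_pos hc, if_pos hc]
            cases hg : PySem.List.pyGet? qs (q + min (len - 1) (cand - r)) with
            | none => rw [pv_a_none, pv_b_none]; rfl
            | some ch =>
              exact ih (String.singleton ch) ins 0 (q + len) (r + len) le_rfl (by omega)
          · rw [if_neg hc, if_neg hc]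
            exact ih cur ins 0 (q + len) (r + len) le_rfl (by omega)
        · by_cases hI : c = 'I'
          · subst hI
            have hA : pvAStep qs cand (some (cur, ins, len, q, r)) 'I' =
                some (cur,
                  (if r = cand + 1 then
                    String.ofList (PySem.List.slice qs (some q) (some (q + len))) else ins),
                  0, q + len, r) := by
              simp [pvAStep, hd]
            have hB : pvBStep qs cand (some (cur, ins, q, r)) (len, 'I') =
                some (cur,
                  (if r = cand + 1 then
                    String.ofList (PySem.List.slice qs (some q) (some (q + len))) else ins),
                  q + len, r) := by
              simp [pvBStep]
            rw [hA, hB]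
            exact ih cur _ 0 (q + len) r le_rfl (by omega)
          · by_cases hD : c = 'D'
            · subst hD
              have e : (PySem.List.pyRange 0 len 1).foldl (fun st _ => pvAD cand st)
                  (cur, r) = (pvAD cand)^[len.toNat] (cur, r) := by
                rw [pv_foldl_ignore, PySem.List.length_pyRange_one, sub_zero]
              have hA : pvAStep qs cand (some (cur, ins, len, q, r)) 'D' =
                  some (((pvAD cand)^[len.toNat] (cur, r)).1, ins, 0, q,
                    ((pvAD cand)^[len.toNat] (cur, r)).2) := by
                simp [pvAStep, hd, e]
              rw [hA, pv_dIter cand len.toNat cur r, hcast]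
              have hB : pvBStep qs cand (some (cur, ins, q, r)) (len, 'D') =
                  some ((if 0 < len ∧ r ≤ cand then "-" else cur), ins, q, r + len) := by
                simp [pvBStep]
              rw [hB]
              exact ih _ ins 0 q (r + len) le_rfl hq
            · have hA : pvAStep qs cand (some (cur, ins, len, q, r)) c =
                  some (cur, ins, 0, q, r) := by
                simp [pvAStep, hd, hS, hM, hI, hD]
              have hB : pvBStep qs cand (some (cur, ins, q, r)) (len, c) =
                  some (cur, ins, q, r) := by
                simp [pvBStep, hS, hM, hI, hD]
              rw [hA, hB]
              exact ih cur ins 0 q r le_rfl hq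

-- ===== VERDICT (by name: the statement is the Claim_ definition above) =====
theorem get_query_base_spec : Claim_equal_get_query_base := by
  intro query_seq cigar ref_start candidate_pos _ _
  unfold Spec_get_query_base get_query_base get_query_base_alt
  have h := pv_fuse query_seq.toList candidate_pos cigar.toList "" "N" 0 0 ref_start le_rfl le_rfl
  rw [← h]
  cases cigar.toList.foldl (pvAStep query_seq.toList candidate_pos)
      (some ("", "N", 0, 0, ref_start)) with
  | none => rfl
  | some st => rfl
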